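-- pv_equiv track=rewrite | github.com/Juanpa1911/Carp_paradigmas | Codigos/TP Repaso/TP Repaso.py | cont_pares
-- ===== SOURCE A (Python) =====
-- def cont_pares(a):
--     contador_pares = 0
--     palabra = []
--     for i in a:
--         if i != " ":
--             palabra.append(i)
--         else:
--             if len(palabra) % 2 == 0:
--                 contador_pares = contador_pares + 1
--             palabra = []
--     return contador_pares
-- ===== SOURCE B (Python) =====
-- def cont_pares(a):
--     # count even-length words that are terminated by a space:
--     # split on single spaces; every segment except the trailing
--     # (unterminated) one was closed by a space.
--     return sum(1 for w in a.split(" ")[:-1] if len(w) % 2 == 0)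
-- ===== Notes on version B (the rewrite author's own statement) =====
-- stated objective: idiomatic
-- what changed: Replaced the explicit char-by-char loop maintaining a current-word accumulator with a split-on-space followed by a count over all segments except the trailing unterminated one.
import Mathlib
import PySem

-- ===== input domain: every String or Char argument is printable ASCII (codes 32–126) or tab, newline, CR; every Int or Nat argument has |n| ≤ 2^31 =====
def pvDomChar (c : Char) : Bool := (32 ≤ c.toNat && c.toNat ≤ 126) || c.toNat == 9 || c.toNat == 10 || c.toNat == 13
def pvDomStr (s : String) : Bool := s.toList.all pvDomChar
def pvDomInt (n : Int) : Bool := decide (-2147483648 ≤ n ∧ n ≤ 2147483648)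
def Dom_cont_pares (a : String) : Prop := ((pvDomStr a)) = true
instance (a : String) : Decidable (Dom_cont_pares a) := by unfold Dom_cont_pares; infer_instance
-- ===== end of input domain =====

-- B replaces A's char-by-char current-word loop by split-on-space + count of all
-- segments except the trailing unterminated one (idiomatic; same O(n), measured constant-factor faster).


-- ===== PORT A =====
def cont_pares (a : String) : Int :=
  (a.toList.foldl
    (fun (s : Int × List Char) i =>
      if i ≠ ' ' then (s.1, s.2 ++ [i])
      else (if s.2.length % 2 == 0 then s.1 + 1 else s.1, []))
    ((0 : Int), ([] : List Char))).1

-- ===== PORT B =====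
def cont_pares_alt (a : String) : Int :=
  (PySem.List.slice ((PySem.Str.split? a " ").getD []) none (some (-1))).foldl
    (fun (acc : Int) w => if PySem.Int.mod (PySem.Str.len w) 2 == 0 then acc + 1 else acc) 0

-- ===== PRECONDITION & SPEC =====
def Spec_cont_pares (a : String) (out : Int) : Prop := out = cont_pares_alt a
instance (a : String) (out : Int) : Decidable (Spec_cont_pares a out) := by unfold Spec_cont_pares; infer_instance

-- ===== CLAIM (what is proved, stated in full; the proofs are below) =====
def Claim_equal_cont_pares : Prop := ∀ (a : String), Dom_cont_pares a → Spec_cont_pares a (cont_pares a)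

-- ===== LEMMAS AND PROOFS =====

-- reference split: Python's  s.split(" ")  over List Char
def pvConsHead (w : List Char) : List (List Char) → List (List Char)
  | [] => [w]
  | x :: xs => (w ++ x) :: xs

def pvSplit : List Char → List (List Char)
  | [] => [[]]
  | c :: cs => if c = ' ' then [] :: pvSplit cs else pvConsHead [c] (pvSplit cs)

theorem pvConsHead_ne_nil (w : List Char) (l : List (List Char)) : pvConsHead w l ≠ [] := by
  cases l <;> simp [pvConsHead]

theorem pvSplit_ne_nil (cs : List Char) : pvSplit cs ≠ [] := by
  cases cs with
  | nil => simp [pvSplit]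
  | cons c cs => by_cases h : c = ' ' <;> simp [pvSplit, h, pvConsHead_ne_nil]

theorem pvConsHead_append (w : List Char) (c : Char) (l : List (List Char)) :
    pvConsHead (w ++ [c]) l = pvConsHead w (pvConsHead [c] l) := by
  cases l <;> simp [pvConsHead]

theorem go_spec : ∀ (fuel : Nat) (l cur : List Char) (acc : List (List Char)),
    l.length < fuel →
    PySem.Chars.splitOn.go [' '] fuel l cur acc = acc.reverse ++ pvConsHead cur.reverse (pvSplit l) := by
  intro fuel
  induction fuel with
  | zero => intro l cur acc h; omega
  | succ n ih =>
    intro l cur acc h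
    cases l with
    | nil => simp [PySem.Chars.splitOn.go, pvSplit, pvConsHead]
    | cons c rest =>
      by_cases hc : c = ' '
      · subst hc
        have hpre : List.isPrefixOf [' '] (' ' :: rest) = true := by
          simp [List.isPrefixOf]
        simp only [PySem.Chars.splitOn.go, hpre, if_pos]
        rw [ih _ _ _ (by simpa using Nat.lt_of_succ_lt_succ h)]
        cases hps : pvSplit rest with
        | nil => exact absurd hps (pvSplit_ne_nil rest)
        | cons x xs => simp [pvSplit, pvConsHead, hps, List.drop]
      · have hpre : List.isPrefixOf [' '] (c :: rest) = false := by
          simp [List.isPrefixOf]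
          intro h'; exact hc h'.symm
        simp only [PySem.Chars.splitOn.go, hpre, Bool.false_eq_true, if_false]
        rw [ih _ _ _ (by simpa using Nat.lt_of_succ_lt_succ h)]
        have : (c :: cur).reverse = cur.reverse ++ [c] := by simp
        rw [this, pvConsHead_append]
        simp [pvSplit, hc]

theorem splitOn_eq_pvSplit (cs : List Char) : PySem.Chars.splitOn cs [' '] = pvSplit cs := by
  unfold PySem.Chars.splitOn
  rw [go_spec (cs.length + 1) cs [] [] (by omega)]
  cases h : pvSplit cs with
  | nil => exact absurd h (pvSplit_ne_nil cs)
  | cons x xs => simp [pvConsHead]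

theorem pvSplit_no_space (w : List Char) (hw : ' ' ∉ w) : pvSplit w = [w] := by
  induction w with
  | nil => simp [pvSplit]
  | cons c w ih =>
    have hc : c ≠ ' ' := fun h => hw (by simp [h])
    rw [pvSplit, if_neg hc, ih (fun h => hw (List.mem_cons_of_mem _ h))]
    simp [pvConsHead]

theorem pvSplit_append_space (w rest : List Char) (hw : ' ' ∉ w) :
    pvSplit (w ++ ' ' :: rest) = w :: pvSplit rest := by
  induction w with
  | nil => simp [pvSplit]
  | cons c w ih =>
    have hc : c ≠ ' ' := fun h => hw (by simp [h])
    simp only [List.cons_append, pvSplit, if_neg hc,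
      ih (fun h => hw (List.mem_cons_of_mem _ h))]
    simp [pvConsHead]

-- the even-length predicate, on List Char
def pvEven (x : List Char) : Bool := x.length % 2 == 0

theorem mainA : ∀ (cs w : List Char) (acc : Int), ' ' ∉ w →
    (cs.foldl
      (fun (s : Int × List Char) i =>
        if i ≠ ' ' then (s.1, s.2 ++ [i])
        else (if s.2.length % 2 == 0 then s.1 + 1 else s.1, []))
      (acc, w)).1
    = acc + (((pvSplit (w ++ cs)).dropLast.countP pvEven : Nat) : Int) := by
  intro cs
  induction cs with
  | nil =>
    intro w acc hw
    simp [pvSplit_no_space w hw]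
  | cons c rest ih =>
    intro w acc hw
    by_cases hc : c = ' '
    · subst hc
      simp only [List.foldl_cons, ne_eq, not_true_eq_false, if_false]
      rw [ih [] _ (by simp)]
      simp only [List.nil_append]
      rw [pvSplit_append_space w rest hw]
      cases h : pvSplit rest with
      | nil => exact absurd h (pvSplit_ne_nil rest)
      | cons x xs =>
        have hd : (w :: x :: xs).dropLast = w :: (x :: xs).dropLast :=
          List.dropLast_cons_of_ne_nil (by simp)
        rw [hd, List.countP_cons]
        simp only [pvEven]
        split_ifs with he <;> push_cast <;> ring
    · simp only [List.foldl_cons, ne_eq, hc, not_false_eq_true, if_true]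
      rw [ih (w ++ [c]) acc (by
        intro h
        rcases List.mem_append.mp h with h' | h'
        · exact hw h'
        · simp at h'; exact hc h'.symm)]
      simp

theorem altB (a : String) :
    cont_pares_alt a = (((pvSplit a.toList).dropLast.countP pvEven : Nat) : Int) := by
  have h := PySem.Str.split?_map a " "
  rw [show (" " : String).toList = [' '] from rfl] at h
  rw [PySem.Chars.split?] at h
  simp only [List.isEmpty_cons, Bool.false_eq_true, if_false] at h
  cases e : PySem.Str.split? a " " with
  | none => rw [e] at h; simp at h
  | some ps =>
    rw [e] at h
    simp only [Option.map_some, Option.some.injEq] at h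
    unfold cont_pares_alt
    rw [e, Option.getD_some, PySem.List.slice_to_neg_one,
      PySem.List.foldl_count_if (fun w => PySem.Int.mod (PySem.Str.len w) 2 == 0)]
    rw [splitOn_eq_pvSplit] at h
    rw [← h, ← List.map_dropLast, List.countP_map, zero_add]
    congr 1
    apply List.countP_congr
    intro w _
    simp only [Function.comp, pvEven, PySem.Str.len_eq]
    rw [show ((2 : Int)) = ((2 : Nat) : Int) from rfl, PySem.Int.mod_natCast]
    simp
    omega

-- ===== VERDICT (by name: the statement is the Claim_ definition above) =====
theorem cont_pares_spec : Claim_equal_cont_pares := by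
  intro a _
  unfold Spec_cont_pares cont_pares
  rw [altB, mainA a.toList [] 0 (by simp)]
  simp
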